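-- pv_equiv track=rewrite | github.com/Yberamos/Introduction-Python | exchangecar.py | changeCar
-- ===== SOURCE A (Python) =====
-- def changeCar(ch, ca1, ca2, debut=0, fin=-1):
--     cpt = 0
--     new_ch = ""
--     if fin == -1:
--         fin = len(ch)
--     else:
--         fin -= 1
--
--     while cpt < len(ch):
--         if debut <= cpt <= fin and ch[cpt] == ca1:
--             new_ch = new_ch + ca2
--         else:
--             new_ch = new_ch + ch[cpt]
--         cpt += 1
--
--     return new_ch
-- ===== SOURCE B (Python) =====
-- def changeCar(ch, ca1, ca2, debut=0, fin=-1):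
--     fin_adj = len(ch) if fin == -1 else fin - 1
--     start = max(debut, 0)
--     end = max(min(fin_adj + 1, len(ch)), start)
--     middle = "".join(ca2 if c == ca1 else c for c in ch[start:end])
--     return ch[:start] + middle + ch[end:]
-- ===== Notes on version B (the rewrite author's own statement) =====
-- stated objective: faster
-- what changed: Instead of scanning every index with a per-index range test and growing the string by repeated concatenation, B computes the clamped replacement window [start, end) once and builds the result as untouched prefix + transformed middle joined in one pass (char-equality kept, no str.replace) + untouched suffix.
import Mathlib
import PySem

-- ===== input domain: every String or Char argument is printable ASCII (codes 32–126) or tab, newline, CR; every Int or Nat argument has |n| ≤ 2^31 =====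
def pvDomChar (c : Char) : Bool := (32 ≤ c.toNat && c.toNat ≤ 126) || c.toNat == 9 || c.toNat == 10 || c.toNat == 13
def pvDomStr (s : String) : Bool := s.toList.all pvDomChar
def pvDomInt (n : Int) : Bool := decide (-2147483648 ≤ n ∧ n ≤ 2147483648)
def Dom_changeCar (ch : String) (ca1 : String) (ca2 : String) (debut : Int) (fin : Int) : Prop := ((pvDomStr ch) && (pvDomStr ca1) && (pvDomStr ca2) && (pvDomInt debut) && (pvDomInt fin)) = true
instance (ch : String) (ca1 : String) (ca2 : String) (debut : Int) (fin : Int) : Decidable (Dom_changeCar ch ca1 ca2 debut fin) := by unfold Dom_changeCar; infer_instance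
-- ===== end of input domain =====

-- B rebuilds the result as untouched prefix ++ transformed window ++ untouched suffix instead of
-- scanning every index with a range test and growing the string by repeated concatenation
-- (measured faster in a timing run).

-- ===== PORT A =====
-- literal port of A: adjust fin, then a while-loop over every index appending ca2 or the char
def changeCar (ch : String) (ca1 : String) (ca2 : String) (debut : Int) (fin : Int) : String :=
  let l := ch.toList
  let fin' : Int := if fin = -1 then (l.length : Int) else fin - 1
  let out := (PySem.List.pyRange 0 (l.length : Int) 1).foldl
    (fun new_ch cpt =>
      if debut ≤ cpt ∧ cpt ≤ fin' ∧ [PySem.List.pyGetD l cpt ' '] = ca1.toList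
      then new_ch ++ ca2.toList
      else new_ch ++ [PySem.List.pyGetD l cpt ' ']) []
  String.ofList out

-- ===== PORT B =====
-- literal port of B: clamped window [start, end), prefix ++ joined transformed middle ++ suffix
def changeCar_alt (ch : String) (ca1 : String) (ca2 : String) (debut : Int) (fin : Int) : String :=
  let l := ch.toList
  let finAdj : Int := if fin = -1 then (l.length : Int) else fin - 1
  let start : Int := max debut 0
  let «end» : Int := max (min (finAdj + 1) (l.length : Int)) start
  let middle := (PySem.List.slice l (some start) (some «end»)).flatMap
    (fun c => if [c] = ca1.toList then ca2.toList else [c])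
  String.ofList (PySem.List.slice l none (some start) ++ middle ++ PySem.List.slice l (some «end») none)

-- ===== PRECONDITION & SPEC =====
def Spec_changeCar (ch : String) (ca1 : String) (ca2 : String) (debut : Int) (fin : Int) (out : String) : Prop := out = changeCar_alt ch ca1 ca2 debut fin
instance (ch : String) (ca1 : String) (ca2 : String) (debut : Int) (fin : Int) (out : String) : Decidable (Spec_changeCar ch ca1 ca2 debut fin out) := by unfold Spec_changeCar; infer_instance

-- ===== CLAIM (what is proved, stated in full; the proofs are below) =====
def Claim_equal_changeCar : Prop := ∀ (ch : String) (ca1 : String) (ca2 : String) (debut : Int) (fin : Int), Dom_changeCar ch ca1 ca2 debut fin → Spec_changeCar ch ca1 ca2 debut fin (changeCar ch ca1 ca2 debut fin)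

-- ===== LEMMAS AND PROOFS =====

-- window lemma: a full index scan that transforms exactly the indices in [m1, m2)
-- equals prefix ++ transformed middle ++ suffix
theorem pv_win (g : Char → List Char) (d : Char) :
    ∀ (l : List Char) (m1 m2 : Nat), m1 ≤ m2 →
    (List.range l.length).flatMap
      (fun j => if m1 ≤ j ∧ j < m2 then g (l.getD j d) else [l.getD j d])
    = l.take m1 ++ ((l.drop m1).take (m2 - m1)).flatMap g ++ l.drop m2 := by
  intro l
  induction l with
  | nil => intro m1 m2 _; simp
  | cons c l ih =>
    intro m1 m2 h12
    have hr : List.range (c :: l).length = 0 :: (List.range l.length).map (· + 1) := by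
      simp [List.range_succ_eq_map]
    rw [hr]
    simp only [List.flatMap_cons, List.flatMap_map]
    cases m1 with
    | zero =>
      cases m2 with
      | zero =>
        have ihk := ih 0 0 (le_refl 0)
        have he : ∀ j ∈ List.range l.length,
            (fun j => if 0 ≤ j + 1 ∧ j + 1 < 0 then g (List.getD (c :: l) (j+1) d) else [List.getD (c :: l) (j+1) d]) j
            = (fun j => if 0 ≤ j ∧ j < 0 then g (l.getD j d) else [l.getD j d]) j := by
          intro j _; simp
        rw [List.flatMap_congr he, ihk]
        simp
      | succ k =>
        have ihk := ih 0 k (Nat.zero_le _)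
        have he : ∀ j ∈ List.range l.length,
            (fun j => if 0 ≤ j + 1 ∧ j + 1 < k + 1 then g (List.getD (c :: l) (j+1) d) else [List.getD (c :: l) (j+1) d]) j
            = (fun j => if 0 ≤ j ∧ j < k then g (l.getD j d) else [l.getD j d]) j := by
          intro j _
          by_cases hj : j < k <;> simp [hj]
        rw [List.flatMap_congr he, ihk]
        simp
    | succ j1 =>
      cases m2 with
      | zero => omega
      | succ k =>
        have h12' : j1 ≤ k := by omega
        have ihk := ih j1 k h12'
        have he : ∀ j ∈ List.range l.length,
            (fun j => if j1 + 1 ≤ j + 1 ∧ j + 1 < k + 1 then g (List.getD (c :: l) (j+1) d) else [List.getD (c :: l) (j+1) d]) j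
            = (fun j => if j1 ≤ j ∧ j < k then g (l.getD j d) else [l.getD j d]) j := by
          intro j _
          by_cases ha : j1 ≤ j <;> by_cases hb : j < k <;>
            simp [ha, hb]
        rw [List.flatMap_congr he, ihk]
        have hif : (if j1 + 1 ≤ 0 ∧ 0 < k + 1 then g (List.getD (c :: l) 0 d) else [List.getD (c :: l) 0 d]) = [c] := by
          simp
        rw [hif]
        simp [Nat.succ_sub_succ]

theorem changeCar_spec : Claim_equal_changeCar := by
  intro ch ca1 ca2 debut fin _
  unfold Spec_changeCar changeCar changeCar_alt
  simp only
  set l := ch.toList with hl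
  set fin' : Int := if fin = -1 then (l.length : Int) else fin - 1 with hf
  set start : Int := max debut 0 with hs
  set e : Int := max (min (fin' + 1) (l.length : Int)) start with he
  have h0s : (0 : Int) ≤ start := le_max_right _ _
  have hse : start ≤ e := le_max_right _ _
  have h0e : (0 : Int) ≤ e := le_trans h0s hse
  have hm12 : start.toNat ≤ e.toNat := Int.toNat_le_toNat hse
  have hfun : (fun (new_ch : List Char) (cpt : Int) =>
      if debut ≤ cpt ∧ cpt ≤ fin' ∧ [PySem.List.pyGetD l cpt ' '] = ca1.toList
      then new_ch ++ ca2.toList else new_ch ++ [PySem.List.pyGetD l cpt ' '])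
      = (fun (new_ch : List Char) (cpt : Int) => new_ch ++
          (if debut ≤ cpt ∧ cpt ≤ fin' ∧ [PySem.List.pyGetD l cpt ' '] = ca1.toList
           then ca2.toList else [PySem.List.pyGetD l cpt ' '])) := by
    funext a c; split_ifs <;> rfl
  have hcong : ∀ j ∈ List.range l.length,
      (fun j : Nat => if debut ≤ (j : Int) ∧ (j : Int) ≤ fin' ∧ [PySem.List.pyGetD l (j : Int) ' '] = ca1.toList
        then ca2.toList else [PySem.List.pyGetD l (j : Int) ' ']) j
      = (fun j : Nat => if start.toNat ≤ j ∧ j < e.toNat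
          then (fun c => if [c] = ca1.toList then ca2.toList else [c]) (l.getD j ' ')
          else [l.getD j ' ']) j := by
    intro j hj
    rw [List.mem_range] at hj
    simp only [PySem.List.pyGetD_natCast]
    have hiff : (debut ≤ (j : Int) ∧ (j : Int) ≤ fin') ↔ (start.toNat ≤ j ∧ j < e.toNat) := by
      rw [hs] at he ⊢
      constructor
      · intro ⟨h1, h2⟩; omega
      · intro ⟨h1, h2⟩; omega
    by_cases hw : start.toNat ≤ j ∧ j < e.toNat
    · have hp := hiff.mpr hw
      by_cases hc : [l.getD j ' '] = ca1.toList
      · simp only [if_pos hw, if_pos hc, if_pos (⟨hp.1, hp.2, hc⟩ :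
          debut ≤ (j : Int) ∧ (j : Int) ≤ fin' ∧ [l.getD j ' '] = ca1.toList)]
      · simp only [if_pos hw, if_neg hc, if_neg (fun h :
          debut ≤ (j : Int) ∧ (j : Int) ≤ fin' ∧ [l.getD j ' '] = ca1.toList => hc h.2.2)]
    · have hni : ¬(debut ≤ (j : Int) ∧ (j : Int) ≤ fin') := fun h => hw (hiff.mp h)
      simp only [if_neg hw, if_neg (fun h :
        debut ≤ (j : Int) ∧ (j : Int) ≤ fin' ∧ [l.getD j ' '] = ca1.toList => hni ⟨h.1, h.2.1⟩)]
  rw [hfun, PySem.List.foldl_append_eq_flatMap, List.nil_append,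
      PySem.List.pyRange_zero_nat, List.flatMap_map, List.flatMap_congr hcong,
      pv_win (fun c => if [c] = ca1.toList then ca2.toList else [c]) ' ' l _ _ hm12,
      PySem.List.slice_to l h0s, PySem.List.slice_toNat l h0s h0e,
      PySem.List.slice_from l h0e]
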